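-- pv_equiv track=rewrite | github.com/eunomia-bpf/ebpf-verifier-agent | interface/extractor/proof_engine.py | _looks_pointer_like
-- ===== SOURCE A (Python) =====
-- def _type_matches(actual: str, expected: str) -> bool:
--     if actual == expected:
--         return True
--     if expected.endswith("_") and actual.startswith(expected):
--         return True
--     if expected == "fp" and actual.startswith("fp"):
--         return True
--     if expected == "ptr" and actual.startswith("ptr"):
--         return True
--     if expected == "mem" and actual.startswith("mem"):
--         return True
--     if expected == "dynptr" and "dynptr" in actual:
--         return True
--     if expected == "iter" and actual.startswith("iter"):
--         return True
--     return False
--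
-- def _looks_pointer_like(actual: str) -> bool:
--     lowered = actual.lower()
--     if lowered in {"unknown", "scalar", "inv"} or _is_raw_stack_content(lowered):
--         return False
--     return any(
--         _type_matches(lowered, expected)
--         for expected in ("ctx", "fp", "map_ptr", "map_value", "pkt", "ptr", "mem", "sock")
--     )
--
-- def _is_raw_stack_content(actual: str) -> bool:
--     return bool(actual) and set(actual) <= set("?0123456789abcdefm")
-- ===== SOURCE B (Python) =====
-- def _looks_pointer_like(actual: str) -> bool:
--     lowered = actual.lower()
--     if lowered.startswith("mem"):
--         # pointer-like unless the whole string reads as raw stack bytes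
--         return any(c not in "?0123456789abcdefm" for c in lowered)
--     return lowered in {"ctx", "map_ptr", "map_value", "pkt", "sock"} or lowered.startswith(("fp", "ptr"))
-- ===== Notes on version B (the rewrite author's own statement) =====
-- stated objective: alternative
-- what changed: B drops A's up-front exclusion guard and its any()-over-_type_matches loop entirely: it branches first on the 'mem' prefix (where the raw-stack alphabet test is inverted into the answer itself) and otherwise decides by one exact-membership set plus an fp/ptr prefix check, relying on the fact that the unknown/scalar/inv and raw-stack exclusions are redundant outside the mem branch because every other positive tag contains a character outside the raw alphabet.
import Mathlib
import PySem

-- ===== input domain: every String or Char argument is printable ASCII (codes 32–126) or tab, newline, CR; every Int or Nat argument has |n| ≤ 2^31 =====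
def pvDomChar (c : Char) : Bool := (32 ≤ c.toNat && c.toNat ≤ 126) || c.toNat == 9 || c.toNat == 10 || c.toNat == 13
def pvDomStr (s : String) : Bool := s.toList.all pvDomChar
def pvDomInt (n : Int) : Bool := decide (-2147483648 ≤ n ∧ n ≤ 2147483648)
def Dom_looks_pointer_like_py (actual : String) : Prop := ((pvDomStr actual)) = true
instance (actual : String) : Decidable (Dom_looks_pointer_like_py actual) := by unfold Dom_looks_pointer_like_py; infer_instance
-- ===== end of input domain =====

-- B drops A's exclusion guard and any()-helper loop: it branches on the 'mem' prefix (inverting the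
-- raw-stack alphabet test there) and otherwise uses one exact set plus an fp/ptr prefix check
-- (objective: alternative; the exclusions are redundant outside the mem branch).

-- ===== PORT A =====
def type_matches_py (actual expected : String) : Bool :=
  if actual == expected then true
  else if PySem.Str.endswith expected "_" && PySem.Str.startswith actual expected then true
  else if expected == "fp" && PySem.Str.startswith actual "fp" then true
  else if expected == "ptr" && PySem.Str.startswith actual "ptr" then true
  else if expected == "mem" && PySem.Str.startswith actual "mem" then true
  else if expected == "dynptr" && PySem.Str.isIn "dynptr" actual then true
  else if expected == "iter" && PySem.Str.startswith actual "iter" then true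
  else false

def is_raw_stack_content_py (actual : String) : Bool :=
  !(actual == "") && PySem.Set.issubset (PySem.Set.ofList actual.toList) (PySem.Set.ofList "?0123456789abcdefm".toList)

def looks_pointer_like_py (actual : String) : Bool :=
  let lowered := PySem.Str.lower actual
  if (lowered == "unknown" || lowered == "scalar" || lowered == "inv") || is_raw_stack_content_py lowered then
    false
  else
    ["ctx", "fp", "map_ptr", "map_value", "pkt", "ptr", "mem", "sock"].any
      (fun expected => type_matches_py lowered expected)

-- ===== PORT B =====
def looks_pointer_like_py_alt (actual : String) : Bool :=
  let lowered := PySem.Str.lower actual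
  if PySem.Str.startswith lowered "mem" then
    lowered.toList.any (fun c => !(("?0123456789abcdefm".toList).contains c))
  else
    (lowered == "ctx" || lowered == "map_ptr" || lowered == "map_value" || lowered == "pkt" || lowered == "sock")
      || PySem.Str.startswith lowered "fp" || PySem.Str.startswith lowered "ptr"

-- ===== PRECONDITION & SPEC =====
def Spec_looks_pointer_like_py (actual : String) (out : Bool) : Prop := out = looks_pointer_like_py_alt actual
instance (actual : String) (out : Bool) : Decidable (Spec_looks_pointer_like_py actual out) := by unfold Spec_looks_pointer_like_py; infer_instance

-- ===== CLAIM =====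
def Claim_equal_looks_pointer_like_py : Prop := ∀ (actual : String), Dom_looks_pointer_like_py actual → Spec_looks_pointer_like_py actual (looks_pointer_like_py actual)

-- ===== LEMMAS AND PROOFS =====

-- the set-subset test of A's raw-stack helper equals a per-character scan of the lowered string
lemma raw_eq (s : String) :
    is_raw_stack_content_py s
      = (!(s == "") && s.toList.all (fun c => ("?0123456789abcdefm".toList).contains c)) := by
  unfold is_raw_stack_content_py
  congr 1
  rw [Bool.eq_iff_iff]
  simp [PySem.Set.issubset, List.all_eq_true, PySem.Set.mem_ofList]

-- A's any() over the eight tags collapses to exact membership plus the three prefix checks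
lemma any_eq (l : String) :
    (["ctx", "fp", "map_ptr", "map_value", "pkt", "ptr", "mem", "sock"].any
        (fun expected => type_matches_py l expected))
      = ((l == "ctx" || l == "map_ptr" || l == "map_value" || l == "pkt" || l == "sock")
          || PySem.Str.startswith l "fp" || PySem.Str.startswith l "ptr" || PySem.Str.startswith l "mem") := by
  have hfp : (PySem.Chars.endswith ['f','p'] ['_']) = false := by decide
  have hptr : (PySem.Chars.endswith ['p','t','r'] ['_']) = false := by decide
  have hmem : (PySem.Chars.endswith ['m','e','m'] ['_']) = false := by decide
  have hctx : (PySem.Chars.endswith ['c','t','x'] ['_']) = false := by decide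
  have hmp : (PySem.Chars.endswith ['m','a','p','_','p','t','r'] ['_']) = false := by decide
  have hmv : (PySem.Chars.endswith ['m','a','p','_','v','a','l','u','e'] ['_']) = false := by decide
  have hpkt : (PySem.Chars.endswith ['p','k','t'] ['_']) = false := by decide
  have hsock : (PySem.Chars.endswith ['s','o','c','k'] ['_']) = false := by decide
  simp only [List.any_cons, List.any_nil, type_matches_py]
  simp [hfp, hptr, hmem, hctx, hmp, hmv, hpkt, hsock]
  rw [Bool.eq_iff_iff]
  simp only [Bool.or_eq_true, decide_eq_true_eq, beq_iff_eq]
  constructor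
  · rintro (h|h|h|h|h|h|h|h)
    · tauto
    · rcases h with rfl|h
      · have : PySem.Chars.startswith "fp".toList ['f','p'] = true := by decide
        tauto
      · tauto
    · tauto
    · tauto
    · tauto
    · rcases h with rfl|h
      · have : PySem.Chars.startswith "ptr".toList ['p','t','r'] = true := by decide
        tauto
      · tauto
    · rcases h with rfl|h
      · have : PySem.Chars.startswith "mem".toList ['m','e','m'] = true := by decide
        tauto
      · tauto
    · tauto
  · intro h
    tauto

-- core equality of the two bodies, for an arbitrary (already lowered) string
lemma core_eq (s : String) :
    (if (s == "unknown" || s == "scalar" || s == "inv") || is_raw_stack_content_py s then false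
     else ["ctx", "fp", "map_ptr", "map_value", "pkt", "ptr", "mem", "sock"].any
       (fun expected => type_matches_py s expected))
  = (if PySem.Str.startswith s "mem" then
       s.toList.any (fun c => !(("?0123456789abcdefm".toList).contains c))
     else (s == "ctx" || s == "map_ptr" || s == "map_value" || s == "pkt" || s == "sock")
       || PySem.Str.startswith s "fp" || PySem.Str.startswith s "ptr") := by
  rw [any_eq, raw_eq]
  obtain ⟨L, rfl⟩ : ∃ L, s = String.ofList L := ⟨s.toList, String.ofList_toList.symm⟩
  by_cases hm : PySem.Chars.startswith L ['m','e','m'] = true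
  · -- mem-prefixed: A reduces to the negated raw-stack test, like B
    obtain ⟨r, rfl⟩ : ∃ r, L = 'm'::'e'::'m'::r := by
      rw [PySem.Chars.startswith_iff] at hm
      obtain ⟨r, rfl⟩ := hm
      exact ⟨r, rfl⟩
    have hm' : PySem.Str.startswith (String.ofList ('m'::'e'::'m'::r)) "mem" = true := by
      simpa [PySem.Str.startswith] using hm
    rw [hm', if_pos rfl]
    simp only [String.toList_ofList]
    rw [← List.not_all_eq_any_not]
    simp [String.ext_iff, List.all_cons]
    rw [Bool.eq_iff_iff]
    simp [List.all_eq_true]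
  · rw [Bool.not_eq_true] at hm
    have hm' : PySem.Str.startswith (String.ofList L) "mem" = false := by
      simpa [PySem.Str.startswith] using hm
    simp only [hm', Bool.false_eq_true, if_false]
    simp only [String.toList_ofList]
    by_cases hg : ((String.ofList L == "unknown" || String.ofList L == "scalar" || String.ofList L == "inv")
        || (!(String.ofList L == "") && L.all (fun c => ("?0123456789abcdefm".toList).contains c))) = true
    · rw [if_pos hg]
      rcases Bool.or_eq_true_iff.mp hg with he | hr
      · -- one of the three literal exclusions: evaluate B at that literal
        have : (L = "unknown".toList ∨ L = "scalar".toList) ∨ L = "inv".toList := by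
          simpa [String.ext_iff] using he
        rcases this with (rfl | rfl) | rfl <;> decide
      · -- raw-stack string: every positive disjunct needs a char outside the raw alphabet
        rw [Bool.and_eq_true, List.all_eq_true] at hr
        have hall := hr.2
        have hne : ∀ (M : List Char), String.ofList L = String.ofList M →
            (∃ c ∈ M, ("?0123456789abcdefm".toList).contains c = false) → False := by
          rintro M h ⟨c, hc, hcf⟩
          have hLM : L = M := by simpa using congrArg String.toList h
          subst hLM
          exact absurd (hall c hc) (by simp only [hcf]; decide)
        have hp : ∀ (P : List Char), 'p' ∈ P → PySem.Chars.startswith L P = false := by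
          intro P hPp
          rw [Bool.eq_false_iff]
          intro h
          rw [PySem.Chars.startswith_iff] at h
          obtain ⟨r, hr2⟩ := h
          exact absurd (hall 'p' (by rw [← hr2]; exact List.mem_append_left r hPp)) (by decide)
        have h1 : (String.ofList L == "ctx") = false := by
          rw [beq_eq_false_iff_ne]
          intro h
          exact hne "ctx".toList (by simpa using h) ⟨'t', by decide, by decide⟩
        have h2 : (String.ofList L == "map_ptr") = false := by
          rw [beq_eq_false_iff_ne]
          intro h
          exact hne "map_ptr".toList (by simpa using h) ⟨'p', by decide, by decide⟩
        have h3 : (String.ofList L == "map_value") = false := by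
          rw [beq_eq_false_iff_ne]
          intro h
          exact hne "map_value".toList (by simpa using h) ⟨'p', by decide, by decide⟩
        have h4 : (String.ofList L == "pkt") = false := by
          rw [beq_eq_false_iff_ne]
          intro h
          exact hne "pkt".toList (by simpa using h) ⟨'k', by decide, by decide⟩
        have h5 : (String.ofList L == "sock") = false := by
          rw [beq_eq_false_iff_ne]
          intro h
          exact hne "sock".toList (by simpa using h) ⟨'s', by decide, by decide⟩
        have h6 : PySem.Chars.startswith L "fp".toList = false := hp _ (by decide)
        have h7 : PySem.Chars.startswith L "ptr".toList = false := hp _ (by decide)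
        rw [PySem.Str.startswith, PySem.Str.startswith, String.toList_ofList]
        rw [h1, h2, h3, h4, h5, h6, h7]
        decide
    · rw [if_neg hg]
      simp

-- ===== VERDICT =====
theorem looks_pointer_like_py_spec : Claim_equal_looks_pointer_like_py := by
  intro actual _
  unfold Spec_looks_pointer_like_py looks_pointer_like_py looks_pointer_like_py_alt
  exact core_eq (PySem.Str.lower actual)
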